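-- pv_equiv track=rewrite | github.com/Divine11/codeforces | Dreamoon_and_stairs_476A.py | no_of_moves
-- ===== SOURCE A (Python) =====
-- def no_of_moves(n,m):
--     x = n//2
--     while x>0 and (n-x)%m!=0:
--         x-=1
--     y = n-(2*x)
--     if (n-x)%m==0:
--         return x+y
--     else:
--         return -1
-- ===== SOURCE B (Python) =====
-- def no_of_moves(n, m):
--     c = n - n // 2            # fewest steps possible: ceil(n/2)
--     t = c + (-c) % abs(m)     # round c up to the next multiple of m
--     return t if t <= n else -1
-- ===== Notes on version B (the rewrite author's own statement) =====
-- stated objective: faster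
-- what changed: A decrements x from n//2 one step at a time until (n-x) is divisible by m; B computes the answer in closed form as the smallest multiple of m (by magnitude) >= ceil(n/2), via one modulo, returning -1 when it exceeds n. Pre_ excludes only m = 0, where A raises ZeroDivisionError.
-- intended difference: For n < 0 with m dividing ceil(n/2) (and ceil(n/2) != -1), A returns the negative value ceil(n/2) as a 'number of moves' because its loop never runs; B returns -1, the intended no-solution sentinel, since no valid non-negative move count exists for negative n. — e.g. on no_of_moves(-1, 1): A returns 0, B returns -1
import Mathlib
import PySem

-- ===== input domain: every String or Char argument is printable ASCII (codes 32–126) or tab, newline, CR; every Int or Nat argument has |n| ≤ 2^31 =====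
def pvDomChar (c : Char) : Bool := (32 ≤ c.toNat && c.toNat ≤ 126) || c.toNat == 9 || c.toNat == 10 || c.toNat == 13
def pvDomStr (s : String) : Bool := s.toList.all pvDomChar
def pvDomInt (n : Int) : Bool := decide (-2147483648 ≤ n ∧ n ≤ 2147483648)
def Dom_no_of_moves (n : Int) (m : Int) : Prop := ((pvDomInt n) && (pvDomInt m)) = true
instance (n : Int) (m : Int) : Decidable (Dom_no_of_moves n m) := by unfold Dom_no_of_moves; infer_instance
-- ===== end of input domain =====

-- B replaces A's O(n) downward scan by the O(1) closed form: the smallest multiple of m ≥ ceil(n/2), or -1.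

-- ===== PORT A =====
-- the while loop: decrement x while 0 < x and (n - x) % m ≠ 0; fuel bounds the iteration count
def noMovesGo (n : Int) (m : Int) : Nat → Int → Int
  | 0, x => x
  | f + 1, x => if 0 < x ∧ PySem.Int.mod (n - x) m ≠ 0 then noMovesGo n m f (x - 1) else x

def no_of_moves (n : Int) (m : Int) : Int :=
  let x0 := PySem.Int.floordiv n 2
  let x := noMovesGo n m x0.toNat x0
  let y := n - 2 * x
  if PySem.Int.mod (n - x) m = 0 then x + y else -1

-- ===== PORT B =====
def no_of_moves_alt (n : Int) (m : Int) : Int :=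
  let c := n - PySem.Int.floordiv n 2
  let t := c + PySem.Int.mod (-c) |m|
  if t ≤ n then t else -1

-- ===== PRECONDITION & SPEC =====
-- Pre_ excludes exactly m = 0, where the Python A (and B) raise ZeroDivisionError.
def Pre_no_of_moves (n : Int) (m : Int) : Prop := m ≠ 0
instance (n : Int) (m : Int) : Decidable (Pre_no_of_moves n m) := by unfold Pre_no_of_moves; infer_instance
def pvWitness_no_of_moves : Int × Int := (10, 3)

-- For n < 0 with m dividing ceil(n/2) (and ceil(n/2) ≠ -1), A returns the negative value ceil(n/2)
-- as a 'number of moves' because its loop never runs; B returns -1, the intended no-solution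
-- sentinel, since no valid non-negative move count exists for negative n.
def D_no_of_moves (n : Int) (m : Int) : Prop :=
  n < 0 ∧ m ∣ (n - n / 2) ∧ (n - n / 2) ≠ -1
instance (n : Int) (m : Int) : Decidable (D_no_of_moves n m) := by unfold D_no_of_moves; infer_instance

def Spec_no_of_moves (n : Int) (m : Int) (out : Int) : Prop := ¬ D_no_of_moves n m → out = no_of_moves_alt n m
instance (n : Int) (m : Int) (out : Int) : Decidable (Spec_no_of_moves n m out) := by unfold Spec_no_of_moves; infer_instance

def pvDiffWitness_no_of_moves : Int × Int := (-1, 1)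
def pvDiffWitnessOut_no_of_moves : Int × Int := (0, -1)

-- ===== CLAIM (what is proved, stated in full; the proofs are below) =====
def Claim_unchanged_no_of_moves : Prop := ∀ (n : Int) (m : Int), Dom_no_of_moves n m → Pre_no_of_moves n m → Spec_no_of_moves n m (no_of_moves n m)
def Claim_changed_no_of_moves : Prop := Dom_no_of_moves (pvDiffWitness_no_of_moves.1) (pvDiffWitness_no_of_moves.2) ∧ Pre_no_of_moves (pvDiffWitness_no_of_moves.1) (pvDiffWitness_no_of_moves.2) ∧ D_no_of_moves (pvDiffWitness_no_of_moves.1) (pvDiffWitness_no_of_moves.2) ∧ no_of_moves (pvDiffWitness_no_of_moves.1) (pvDiffWitness_no_of_moves.2) = pvDiffWitnessOut_no_of_moves.1 ∧ no_of_moves_alt (pvDiffWitness_no_of_moves.1) (pvDiffWitness_no_of_moves.2) = pvDiffWitnessOut_no_of_moves.2 ∧ pvDiffWitnessOut_no_of_moves.1 ≠ pvDiffWitnessOut_no_of_moves.2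
def Claim_exact_no_of_moves : Prop := ∀ (n : Int) (m : Int), Dom_no_of_moves n m → Pre_no_of_moves n m → D_no_of_moves n m → no_of_moves n m ≠ no_of_moves_alt n m

-- ===== LEMMAS AND PROOFS =====

-- smallest multiple of m that is ≥ c (B's closed form), for m ≥ 1
def tmul (m : Int) (c : Int) : Int := c + PySem.Int.mod (-c) |m|

theorem tmul_dvd (m c : Int) : m ∣ tmul m c := by
  have h := PySem.Int.floordiv_mul_add_mod (-c) |m|
  have he : tmul m c = -(PySem.Int.floordiv (-c) |m|) * |m| := by unfold tmul; linarith
  rw [he]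
  exact (abs_dvd m _).mp (dvd_mul_left _ _)

theorem tmul_ge (m c : Int) (hm : m ≠ 0) : c ≤ tmul m c := by
  have := PySem.Int.mod_nonneg (-c) (abs_pos.mpr hm)
  unfold tmul; omega

theorem tmul_lt (m c : Int) (hm : m ≠ 0) : tmul m c < c + |m| := by
  have := PySem.Int.mod_lt (-c) (abs_pos.mpr hm)
  unfold tmul; omega

theorem tmul_min (m c u : Int) (hm : m ≠ 0) (hu : m ∣ u) (hcu : c ≤ u) : tmul m c ≤ u := by
  by_contra h
  rw [not_le] at h
  have h1 : |m| ∣ tmul m c - u := dvd_sub ((abs_dvd m _).mpr (tmul_dvd m c)) ((abs_dvd m _).mpr hu)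
  have h2 : |m| ≤ tmul m c - u := Int.le_of_dvd (by omega) h1
  have h3 := tmul_lt m c hm
  omega

theorem tmul_eq_of_dvd (m c : Int) (hm : m ≠ 0) (h : m ∣ c) : tmul m c = c :=
  le_antisymm (tmul_min m c c hm h le_rfl) (tmul_ge m c hm)

theorem tmul_succ (m c : Int) (hm : m ≠ 0) (h : ¬ m ∣ c) : tmul m c = tmul m (c + 1) := by
  have h1 : c + 1 ≤ tmul m c := by
    have := tmul_ge m c hm
    rcases lt_or_eq_of_le this with h' | h'
    · omega
    · exact absurd (h' ▸ tmul_dvd m c) h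
  apply le_antisymm
  · exact tmul_min m c _ hm (tmul_dvd m (c + 1)) (le_trans (by omega) (tmul_ge m (c + 1) hm))
  · exact tmul_min m (c + 1) _ hm (tmul_dvd m c) h1

theorem go_spec (n m : Int) (hm : m ≠ 0) : ∀ (f : Nat) (x : Int), 0 ≤ x → x ≤ (f : Int) →
    noMovesGo n m f x = if tmul m (n - x) ≤ n then n - tmul m (n - x) else 0 := by
  intro f
  induction f with
  | zero =>
    intro x hx hxf
    have hx0 : x = 0 := by omega
    subst hx0
    have hg : tmul m (n - 0) = tmul m n := by norm_num
    simp only [noMovesGo, hg]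
    split_ifs with h
    · have := tmul_ge m n hm; omega
    · rfl
  | succ f ih =>
    intro x hx hxf
    by_cases hx0 : x = 0
    · subst hx0
      simp only [noMovesGo, lt_irrefl, false_and, if_false]
      split_ifs with h
      · have := tmul_ge m (n - 0) hm; omega
      · rfl
    · have hxpos : 0 < x := by omega
      by_cases hd : PySem.Int.mod (n - x) m = 0
      · have hdvd : m ∣ (n - x) := (PySem.Int.mod_eq_zero_iff_dvd _ _).mp hd
        have ht : tmul m (n - x) = n - x := tmul_eq_of_dvd m (n - x) hm hdvd
        simp only [noMovesGo]
        rw [if_neg (by simp [hd]), ht]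
        split_ifs with h <;> omega
      · have hdvd : ¬ m ∣ (n - x) := fun h => hd ((PySem.Int.mod_eq_zero_iff_dvd _ _).mpr h)
        have hcond : (0 < x ∧ PySem.Int.mod (n - x) m ≠ 0) := ⟨hxpos, hd⟩
        simp only [noMovesGo, if_pos hcond]
        rw [ih (x - 1) (by omega) (by omega)]
        have he : n - (x - 1) = (n - x) + 1 := by ring
        rw [he, ← tmul_succ m (n - x) hm hdvd]

-- A and B as if-expressions after unfolding the lets, with q := n / 2
theorem A_eq (n m : Int) : no_of_moves n m =
    (if PySem.Int.mod (n - noMovesGo n m (n / 2).toNat (n / 2)) m = 0 then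
      noMovesGo n m (n / 2).toNat (n / 2) + (n - 2 * noMovesGo n m (n / 2).toNat (n / 2)) else -1) := by
  have hfd : PySem.Int.floordiv n 2 = n / 2 := PySem.Int.floordiv_eq_ediv_of_pos (by norm_num)
  simp only [no_of_moves, hfd]

theorem B_eq (n m : Int) : no_of_moves_alt n m =
    (if tmul m (n - n / 2) ≤ n then tmul m (n - n / 2) else -1) := by
  have hfd : PySem.Int.floordiv n 2 = n / 2 := PySem.Int.floordiv_eq_ediv_of_pos (by norm_num)
  simp only [no_of_moves_alt, hfd, tmul]

-- ===== VERDICT (by name: the statements are the Claim_ definitions above) =====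
theorem no_of_moves_spec : Claim_unchanged_no_of_moves := by
  intro n m _ hm hnD
  show no_of_moves n m = no_of_moves_alt n m
  rw [A_eq, B_eq]
  set q := n / 2 with hq
  set c := n - q with hc
  by_cases hq0 : 0 ≤ q
  · -- n ≥ 0: the loop runs from q down; fuel q.toNat suffices
    have hgo := go_spec n m hm q.toNat q hq0 (by omega)
    rw [hgo]
    have hcn : c ≤ n := by omega
    by_cases hT : tmul m c ≤ n
    · rw [if_pos hT, if_pos hT]
      have hd : PySem.Int.mod (n - (n - tmul m c)) m = 0 := by
        have he : n - (n - tmul m c) = tmul m c := by ring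
        rw [he]
        exact (PySem.Int.mod_eq_zero_iff_dvd _ _).mpr (tmul_dvd m c)
      rw [if_pos hd]
      ring
    · rw [if_neg hT, if_neg hT]
      have hnd : ¬ PySem.Int.mod (n - 0) m = 0 := by
        intro h
        have hdvd : m ∣ n := by
          have := (PySem.Int.mod_eq_zero_iff_dvd (n - 0) m).mp h
          simpa using this
        exact hT (tmul_min m c n hm hdvd hcn)
      rw [if_neg hnd]
  · -- n < 0: x0 = q < 0, toNat = 0, the loop body never runs; B returns -1 since tmul m c ≥ c > n
    have hn0 : n < 0 := by omega
    have htn : q.toNat = 0 := by omega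
    rw [htn]
    have hloop : noMovesGo n m 0 q = q := rfl
    rw [hloop]
    have hcgt : n < c := by omega
    have hT : ¬ tmul m c ≤ n := by
      have := tmul_ge m c hm
      omega
    rw [if_neg hT]
    by_cases hd : PySem.Int.mod (n - q) m = 0
    · -- m ∣ c; since ¬D_, c = -1, and A returns n - q + (n - 2q)·… = c = -1
      have hdvd : m ∣ c := (PySem.Int.mod_eq_zero_iff_dvd _ _).mp hd
      have hcm1 : c = -1 := by
        by_contra hne
        exact hnD ⟨hn0, by rw [← hc]; exact hdvd, by rw [← hc]; exact hne⟩
      rw [if_pos hd]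
      omega
    · rw [if_neg hd]

theorem no_of_moves_changed : Claim_changed_no_of_moves := by
  unfold Claim_changed_no_of_moves; decide

theorem no_of_moves_tight : Claim_exact_no_of_moves := by
  intro n m _ hm hD
  obtain ⟨hn0, hdvd, hnem1⟩ := hD
  rw [A_eq, B_eq]
  set q := n / 2 with hq
  set c := n - q with hc
  have hq0 : q < 0 := by omega
  have htn : q.toNat = 0 := by omega
  rw [htn]
  have hloop : noMovesGo n m 0 q = q := rfl
  rw [hloop]
  have hd : PySem.Int.mod (n - q) m = 0 := (PySem.Int.mod_eq_zero_iff_dvd _ _).mpr hdvd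
  rw [if_pos hd]
  have hT : ¬ tmul m c ≤ n := by
    have := tmul_ge m c hm
    omega
  rw [if_neg hT]
  omega
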